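-- pv_equiv track=rewrite | github.com/DGonzalezPicos/DGonzalezPicos.github.io | update_isotope_table.py | get_category_class
-- ===== SOURCE A (Python) =====
-- def get_category_class(category: str) -> str:
--     """Get CSS class for category color coding."""
--     category_lower = category.lower().strip()
--
--     if 'super-jupiter' in category_lower:
--         return 'category-super-jupiter'
--     elif 'young brown dwarf' in category_lower:
--         return 'category-young-brown-dwarf'
--     elif 'brown dwarf' in category_lower:
--         return 'category-brown-dwarf'
--     elif any(stellar in category_lower for stellar in ['star', 'k6', 'm7', 'host-star', 'companion']):
--         return 'category-star'
--     else:
--         return 'category-brown-dwarf'  # default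
-- ===== SOURCE B (Python) =====
-- def get_category_class(category: str) -> str:
--     """Get CSS class via a two-level decision tree with a minimal keyword set.
--
--     Correct because 'young brown dwarf' contains 'brown dwarf' (so the outer
--     branch subsumes A's young-before-brown priority) and 'host-star' contains
--     'star' (so the host-star keyword is redundant)."""
--     s = category.lower().strip()
--     if 'super-jupiter' in s:
--         return 'category-super-jupiter'
--     if 'brown dwarf' in s:
--         if 'young brown dwarf' in s:
--             return 'category-young-brown-dwarf'
--         return 'category-brown-dwarf'
--     if 'star' in s or 'k6' in s or 'm7' in s or 'companion' in s:
--         return 'category-star'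
--     return 'category-brown-dwarf'
-- ===== Notes on version B (the rewrite author's own statement) =====
-- stated objective: simpler
-- what changed: Restructured A's flat priority chain into a two-level decision tree: branch first on 'brown dwarf' and refine with 'young' inside, and drop the redundant 'host-star' keyword since 'star' subsumes it; correctness rests on the substring containments 'brown dwarf' <= 'young brown dwarf' and 'star' <= 'host-star'.
import Mathlib
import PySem

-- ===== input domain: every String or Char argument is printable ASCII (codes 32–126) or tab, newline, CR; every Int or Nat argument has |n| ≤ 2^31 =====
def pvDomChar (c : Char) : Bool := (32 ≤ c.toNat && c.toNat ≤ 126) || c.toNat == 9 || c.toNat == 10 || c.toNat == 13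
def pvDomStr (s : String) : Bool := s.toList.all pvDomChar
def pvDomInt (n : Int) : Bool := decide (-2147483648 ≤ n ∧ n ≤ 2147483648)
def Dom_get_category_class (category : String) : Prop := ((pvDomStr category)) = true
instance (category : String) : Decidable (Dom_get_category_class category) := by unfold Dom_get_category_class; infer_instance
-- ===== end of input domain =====

-- B restructures A's flat priority chain into a two-level decision tree (branch on 'brown dwarf', refine with 'young')
-- and drops the redundant 'host-star' keyword; objective: simpler.
-- ===== PORT A =====
def get_category_class (category : String) : String :=
  let category_lower := PySem.Str.strip (PySem.Str.lower category)
  if PySem.Str.isIn "super-jupiter" category_lower then "category-super-jupiter"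
  else if PySem.Str.isIn "young brown dwarf" category_lower then "category-young-brown-dwarf"
  else if PySem.Str.isIn "brown dwarf" category_lower then "category-brown-dwarf"
  else if ["star", "k6", "m7", "host-star", "companion"].any
      (fun stellar => PySem.Str.isIn stellar category_lower) then "category-star"
  else "category-brown-dwarf"

-- ===== PORT B =====
def get_category_class_alt (category : String) : String :=
  let s := PySem.Str.strip (PySem.Str.lower category)
  if PySem.Str.isIn "super-jupiter" s then "category-super-jupiter"
  else if PySem.Str.isIn "brown dwarf" s then
    (if PySem.Str.isIn "young brown dwarf" s then "category-young-brown-dwarf"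
     else "category-brown-dwarf")
  else if PySem.Str.isIn "star" s || PySem.Str.isIn "k6" s
       || PySem.Str.isIn "m7" s || PySem.Str.isIn "companion" s then "category-star"
  else "category-brown-dwarf"

-- ===== PRECONDITION & SPEC =====
def Spec_get_category_class (category : String) (out : String) : Prop := out = get_category_class_alt category
instance (category : String) (out : String) : Decidable (Spec_get_category_class category out) := by unfold Spec_get_category_class; infer_instance

-- ===== CLAIM =====
def Claim_equal_get_category_class : Prop := ∀ (category : String), Dom_get_category_class category → Spec_get_category_class category (get_category_class category)

-- ===== LEMMAS AND PROOFS =====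
-- 'brown dwarf' is an infix of 'young brown dwarf', so containment transfers.
theorem isIn_young_imp_brown (s : String)
    (h : PySem.Str.isIn "young brown dwarf" s = true) :
    PySem.Str.isIn "brown dwarf" s = true := by
  rw [PySem.Str.isIn_iff_infix] at h ⊢
  exact List.IsInfix.trans (by decide) h

-- 'star' is an infix of 'host-star', so containment transfers.
theorem isIn_hoststar_imp_star (s : String)
    (h : PySem.Str.isIn "host-star" s = true) :
    PySem.Str.isIn "star" s = true := by
  rw [PySem.Str.isIn_iff_infix] at h ⊢
  exact List.IsInfix.trans (by decide) h

-- Core equality of the two decision structures, over an arbitrary (lowered, stripped) string.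
theorem tree_eq (s : String) :
    (if PySem.Str.isIn "super-jupiter" s then "category-super-jupiter"
     else if PySem.Str.isIn "young brown dwarf" s then "category-young-brown-dwarf"
     else if PySem.Str.isIn "brown dwarf" s then "category-brown-dwarf"
     else if ["star", "k6", "m7", "host-star", "companion"].any
         (fun stellar => PySem.Str.isIn stellar s) then "category-star"
     else "category-brown-dwarf")
    =
    (if PySem.Str.isIn "super-jupiter" s then "category-super-jupiter"
     else if PySem.Str.isIn "brown dwarf" s then
       (if PySem.Str.isIn "young brown dwarf" s then "category-young-brown-dwarf"
        else "category-brown-dwarf")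
     else if PySem.Str.isIn "star" s || PySem.Str.isIn "k6" s
          || PySem.Str.isIn "m7" s || PySem.Str.isIn "companion" s then "category-star"
     else "category-brown-dwarf") := by
  by_cases h1 : PySem.Str.isIn "super-jupiter" s = true
  · simp only [h1, if_true]
  · simp only [Bool.not_eq_true] at h1
    simp only [h1, Bool.false_eq_true, if_false]
    by_cases h2 : PySem.Str.isIn "young brown dwarf" s = true
    · simp only [h2, isIn_young_imp_brown s h2, if_true]
    · simp only [Bool.not_eq_true] at h2
      simp only [h2, Bool.false_eq_true, if_false]
      by_cases h3 : PySem.Str.isIn "brown dwarf" s = true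
      · simp only [h3, if_true]
      · simp only [Bool.not_eq_true] at h3
        simp only [h3, Bool.false_eq_true, if_false]
        have hb : (["star", "k6", "m7", "host-star", "companion"].any
            (fun stellar => PySem.Str.isIn stellar s))
            = (PySem.Str.isIn "star" s || PySem.Str.isIn "k6" s
               || PySem.Str.isIn "m7" s || PySem.Str.isIn "companion" s) := by
          simp only [List.any_cons, List.any_nil, Bool.or_false]
          by_cases h4 : PySem.Str.isIn "host-star" s = true
          · have hst := isIn_hoststar_imp_star s h4
            simp only [PySem.Str.isIn] at h4 hst
            simp at h4 hst
            simp [h4, hst]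
          · simp only [Bool.not_eq_true] at h4
            simp only [PySem.Str.isIn] at h4
            simp at h4
            simp [h4, Bool.or_assoc]
        rw [hb]

-- ===== VERDICT =====
theorem get_category_class_spec : Claim_equal_get_category_class := by
  intro category _
  unfold Spec_get_category_class get_category_class get_category_class_alt
  exact tree_eq (PySem.Str.strip (PySem.Str.lower category))
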